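-- pv_equiv track=rewrite | github.com/jpal29/personal_site | pages/fantasy_premier_league.py | format_option_display
-- ===== SOURCE A (Python) =====
-- seasons = [
-- 	{'display': '2025 - 2026', 'value': '2025_2026'},
-- 	{'display': '2024 - 2025', 'value': '2024_2025'}
-- ]
--
-- chart_coloring_dimensions = [
-- 	{'display': 'Team', 'value': 'team_name'},
-- 	{'display': 'Position', 'value': 'position'},
-- 	{'display': 'Player Name', 'value': 'full_name'}
-- ]
--
-- metrics = [
-- 	{'display': 'Points', 'value': 'total_points'},
-- 	{'display': 'Goals Scored', 'value': 'goals_scored'},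
-- 	{'display': 'Assists', 'value': 'assists'},
-- 	{'display': 'Clean Sheets', 'value': 'clean_sheets'},
-- 	{'display': 'Goals Conceded', 'value': 'goals_conceded'},
-- 	{'display': 'Expected Goals', 'value': 'expected_goals'},
-- 	{'display': 'Expected Assists', 'value': 'expected_assists'},
-- 	{'display': 'Expected Goals Conceded', 'value': 'expected_goals_conceded'}
-- ]
--
-- def format_option_display(option_value):
-- 	for season in seasons:
-- 		if season['value'] == option_value:
-- 			return season['display']
-- 	for dimension in chart_coloring_dimensions:
-- 		if dimension['value'] == option_value:
-- 			return dimension['display']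
-- 	for metric in metrics:
-- 		if metric['value'] == option_value:
-- 			return metric['display']
-- 	return option_value
-- ===== SOURCE B (Python) =====
-- seasons = [
-- 	{'display': '2025 - 2026', 'value': '2025_2026'},
-- 	{'display': '2024 - 2025', 'value': '2024_2025'}
-- ]
--
-- chart_coloring_dimensions = [
-- 	{'display': 'Team', 'value': 'team_name'},
-- 	{'display': 'Position', 'value': 'position'},
-- 	{'display': 'Player Name', 'value': 'full_name'}
-- ]
--
-- metrics = [
-- 	{'display': 'Points', 'value': 'total_points'},
-- 	{'display': 'Goals Scored', 'value': 'goals_scored'},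
-- 	{'display': 'Assists', 'value': 'assists'},
-- 	{'display': 'Clean Sheets', 'value': 'clean_sheets'},
-- 	{'display': 'Goals Conceded', 'value': 'goals_conceded'},
-- 	{'display': 'Expected Goals', 'value': 'expected_goals'},
-- 	{'display': 'Expected Assists', 'value': 'expected_assists'},
-- 	{'display': 'Expected Goals Conceded', 'value': 'expected_goals_conceded'}
-- ]
--
-- # All (value, display) pairs, sorted by value once at module load, so each call
-- # can locate the display name by binary search (bisection) instead of scanning.
-- _TABLE = sorted(
-- 	[(entry['value'], entry['display'])
-- 	 for group in (seasons, chart_coloring_dimensions, metrics)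
-- 	 for entry in group],
-- 	key=lambda p: p[0],
-- )
--
-- def format_option_display(option_value):
-- 	lo, hi = 0, len(_TABLE)
-- 	while lo < hi:
-- 		mid = (lo + hi) // 2
-- 		value, display = _TABLE[mid]
-- 		if value < option_value:
-- 			lo = mid + 1
-- 		elif value > option_value:
-- 			hi = mid
-- 		else:
-- 			return display
-- 	return option_value
-- ===== Notes on version B (the rewrite author's own statement) =====
-- stated objective: alternative
-- what changed: B builds one list of (value, display) pairs sorted by value at module load and answers each call by an explicit binary-search loop with the input as fallback, replacing A's three sequential linear scans.
import Mathlib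
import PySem

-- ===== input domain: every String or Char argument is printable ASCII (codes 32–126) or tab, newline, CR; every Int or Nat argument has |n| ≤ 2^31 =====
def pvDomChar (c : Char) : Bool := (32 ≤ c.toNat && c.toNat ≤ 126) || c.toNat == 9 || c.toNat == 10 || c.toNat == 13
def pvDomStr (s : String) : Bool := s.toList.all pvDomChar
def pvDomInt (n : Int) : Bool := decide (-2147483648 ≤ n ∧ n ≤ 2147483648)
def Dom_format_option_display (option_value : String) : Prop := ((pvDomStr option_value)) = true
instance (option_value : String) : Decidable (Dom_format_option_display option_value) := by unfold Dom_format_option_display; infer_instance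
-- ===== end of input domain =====

-- B replaces A's three sequential linear scans by one (value, display) table sorted by
-- value at module load and an explicit binary-search loop per call (objective: alternative).

-- ===== PORT A =====
-- Each Python entry {'display': d, 'value': v} is a two-key literal dict with both keys
-- always present, so it is modeled exactly as the pair (d, v).
def pvSeasons : List (String × String) :=
  [("2025 - 2026", "2025_2026"), ("2024 - 2025", "2024_2025")]

def pvDims : List (String × String) :=
  [("Team", "team_name"), ("Position", "position"), ("Player Name", "full_name")]

def pvMetrics : List (String × String) :=
  [("Points", "total_points"), ("Goals Scored", "goals_scored"),
   ("Assists", "assists"), ("Clean Sheets", "clean_sheets"),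
   ("Goals Conceded", "goals_conceded"), ("Expected Goals", "expected_goals"),
   ("Expected Assists", "expected_assists"),
   ("Expected Goals Conceded", "expected_goals_conceded")]

-- one 'for … if …: return …' loop of A
def pvScan (entries : List (String × String)) (option_value : String) : Option String :=
  match entries with
  | [] => none
  | (display, value) :: rest =>
      if value == option_value then some display else pvScan rest option_value

def format_option_display (option_value : String) : String :=
  match pvScan pvSeasons option_value with
  | some d => d
  | none =>
    match pvScan pvDims option_value with
    | some d => d
    | none =>
      match pvScan pvMetrics option_value with
      | some d => d
      | none => option_value

-- ===== PORT B =====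
-- Source B's module-level table: all (value, display) pairs, sorted(…, key=lambda p: p[0]).
-- Python's '<' on str is code-point lexicographic = Lean's '<' on .toList (PYSEM.md),
-- so the sort key and the comparisons below go through .toList, where it is exact.
def pvTable : List (String × String) :=
  PySem.List.sorted
    (([pvSeasons, pvDims, pvMetrics].flatMap (fun g => g)).map (fun e => (e.2, e.1)))
    (fun p => p.1.toList)

-- Source B's while-loop, as recursion on the shrinking interval [lo, hi)
def pvBisect (option_value : String) (lo hi : Int) : String :=
  if _h : lo < hi then
    match PySem.List.pyGet? pvTable (PySem.Int.floordiv (lo + hi) 2) with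
    | some (value, display) =>
        if value.toList < option_value.toList then
          pvBisect option_value (PySem.Int.floordiv (lo + hi) 2 + 1) hi
        else if option_value.toList < value.toList then
          pvBisect option_value lo (PySem.Int.floordiv (lo + hi) 2)
        else display
    | none => option_value  -- IndexError in Python; unreachable for the intervals B uses
  else option_value
termination_by (hi - lo).toNat
decreasing_by
  · have hm : PySem.Int.floordiv (lo + hi) 2 = (lo + hi) / 2 :=
      PySem.Int.floordiv_eq_ediv_of_pos (by norm_num)
    omega
  · have hm : PySem.Int.floordiv (lo + hi) 2 = (lo + hi) / 2 :=
      PySem.Int.floordiv_eq_ediv_of_pos (by norm_num)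
    omega

def format_option_display_alt (option_value : String) : String :=
  pvBisect option_value 0 (pvTable.length : Int)

-- ===== PRECONDITION & SPEC =====
def Spec_format_option_display (option_value : String) (out : String) : Prop := out = format_option_display_alt option_value
instance (option_value : String) (out : String) : Decidable (Spec_format_option_display option_value out) := by unfold Spec_format_option_display; infer_instance

-- ===== CLAIM (what is proved, stated in full; the proofs are below) =====
def Claim_equal_format_option_display : Prop := ∀ (option_value : String), Dom_format_option_display option_value → Spec_format_option_display option_value (format_option_display option_value)

-- ===== LEMMAS AND PROOFS =====

-- the sorted table, evaluated
theorem pvTable_eq : pvTable =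
    [("2024_2025", "2024 - 2025"), ("2025_2026", "2025 - 2026"),
     ("assists", "Assists"), ("clean_sheets", "Clean Sheets"),
     ("expected_assists", "Expected Assists"), ("expected_goals", "Expected Goals"),
     ("expected_goals_conceded", "Expected Goals Conceded"), ("full_name", "Player Name"),
     ("goals_conceded", "Goals Conceded"), ("goals_scored", "Goals Scored"),
     ("position", "Position"), ("team_name", "Team"), ("total_points", "Points")] := by
  decide

theorem pvTable_len : pvTable.length = 13 := by rw [pvTable_eq]; rfl

theorem pvTable_sorted : pvTable.Pairwise (fun a b => a.1.toList < b.1.toList) := by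
  rw [pvTable_eq]; decide

-- first-match lookup in the sorted table (proof-side characterisation both ports meet)
def pvLook (s : String) : String :=
  match pvTable.find? (fun p => p.1 == s) with
  | some p => p.2
  | none => s

theorem find_of_mem (s : String) (j : Nat) (hj : j < pvTable.length)
    (hk : (pvTable[j]).1 = s) : pvLook s = (pvTable[j]).2 := by
  rw [pvTable_len] at hj
  unfold pvLook
  simp only [pvTable_eq] at hk ⊢
  interval_cases j <;> simp only [List.getElem_cons_zero, List.getElem_cons_succ] at hk ⊢ <;>
    subst hk <;> decide

theorem find_none (s : String)
    (h : ∀ j : Nat, (hj : j < pvTable.length) → (pvTable[j]).1 ≠ s) :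
    pvLook s = s := by
  unfold pvLook
  have hnone : pvTable.find? (fun p => p.1 == s) = none := by
    rw [List.find?_eq_none]
    intro x hx
    obtain ⟨j, hj, rfl⟩ := List.mem_iff_getElem.mp hx
    simpa using h j hj
  rw [hnone]

theorem bisect_eq (s : String) : ∀ (n : Nat) (lo hi : Int),
    (hi - lo).toNat ≤ n → 0 ≤ lo → hi ≤ (pvTable.length : Int) →
    (∀ j : Nat, (hj : j < pvTable.length) → (pvTable[j]).1 = s → lo ≤ (j : Int) ∧ (j : Int) < hi) →
    pvBisect s lo hi = pvLook s := by
  intro n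
  induction n with
  | zero =>
    intro lo hi hn hlo hhi hinv
    have hnot : ¬ lo < hi := by omega
    rw [pvBisect, dif_neg hnot, find_none]
    intro j hj hk
    have := hinv j hj hk
    omega
  | succ n ih =>
    intro lo hi hn hlo hhi hinv
    by_cases h : lo < hi
    · have hm : PySem.Int.floordiv (lo + hi) 2 = (lo + hi) / 2 :=
        PySem.Int.floordiv_eq_ediv_of_pos (by norm_num)
      set mid := PySem.Int.floordiv (lo + hi) 2 with hmiddef
      have hmid0 : 0 ≤ mid := by omega
      have hmidlt : mid < (pvTable.length : Int) := by rw [pvTable_len] at hhi ⊢; omega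
      have hmnat : mid = ((mid.toNat : Nat) : Int) := by omega
      have hmlt : mid.toNat < pvTable.length := by
        have := pvTable_len; omega
      have hget : PySem.List.pyGet? pvTable mid = some (pvTable[mid.toNat]'hmlt) := by
        conv_lhs => rw [hmnat]
        rw [PySem.List.pyGet?_natCast]
        exact List.getElem?_eq_getElem hmlt
      rw [pvBisect, dif_pos h]
      simp only [← hmiddef, hget]
      have hpw := List.pairwise_iff_getElem.mp pvTable_sorted
      split_ifs with hlt hgt
      · simp only [List.get_eq_getElem] at hlt
        apply ih
        · omega
        · omega
        · exact hhi
        · intro j hj hk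
          refine ⟨?_, (hinv j hj hk).2⟩
          have hjlo := (hinv j hj hk).1
          by_contra hcon
          have hjm : j < mid.toNat ∨ j = mid.toNat := by omega
          rcases hjm with hjm | hjm
          · have hlt2 := hpw j mid.toNat hj hmlt hjm
            rw [hk] at hlt2
            exact lt_irrefl _ (lt_trans hlt2 hlt)
          · subst hjm
            rw [← hk] at hlt
            exact lt_irrefl _ hlt
      · simp only [List.get_eq_getElem] at hlt hgt
        apply ih
        · omega
        · exact hlo
        · omega
        · intro j hj hk
          refine ⟨(hinv j hj hk).1, ?_⟩
          by_contra hcon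
          have hjm : mid.toNat < j ∨ j = mid.toNat := by
            have := (hinv j hj hk).2
            omega
          rcases hjm with hjm | hjm
          · have hlt2 := hpw mid.toNat j hmlt hj hjm
            rw [hk] at hlt2
            exact lt_irrefl _ (lt_trans hlt2 hgt)
          · subst hjm
            rw [← hk] at hgt
            exact lt_irrefl _ hgt
      · simp only [List.get_eq_getElem] at hlt hgt ⊢
        have heq : (pvTable[mid.toNat]).1 = s :=
          String.toList_inj.mp (le_antisymm (le_of_not_gt hgt) (le_of_not_gt hlt))
        exact (find_of_mem s mid.toNat hmlt heq).symm
    · rw [pvBisect, dif_neg h, find_none]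
      intro j hj hk
      have := hinv j hj hk
      omega

-- A's three-scan chain also computes first-match lookup in the (distinct-key) table
theorem a_char (s : String) : format_option_display s = pvLook s := by
  by_cases h1 : "2025_2026" = s; · subst h1; decide
  by_cases h2 : "2024_2025" = s; · subst h2; decide
  by_cases h3 : "team_name" = s; · subst h3; decide
  by_cases h4 : "position" = s; · subst h4; decide
  by_cases h5 : "full_name" = s; · subst h5; decide
  by_cases h6 : "total_points" = s; · subst h6; decide
  by_cases h7 : "goals_scored" = s; · subst h7; decide
  by_cases h8 : "assists" = s; · subst h8; decide
  by_cases h9 : "clean_sheets" = s; · subst h9; decide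
  by_cases h10 : "goals_conceded" = s; · subst h10; decide
  by_cases h11 : "expected_goals" = s; · subst h11; decide
  by_cases h12 : "expected_assists" = s; · subst h12; decide
  by_cases h13 : "expected_goals_conceded" = s; · subst h13; decide
  have e1 := beq_eq_false_iff_ne.mpr h1
  have e2 := beq_eq_false_iff_ne.mpr h2
  have e3 := beq_eq_false_iff_ne.mpr h3
  have e4 := beq_eq_false_iff_ne.mpr h4
  have e5 := beq_eq_false_iff_ne.mpr h5
  have e6 := beq_eq_false_iff_ne.mpr h6
  have e7 := beq_eq_false_iff_ne.mpr h7
  have e8 := beq_eq_false_iff_ne.mpr h8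
  have e9 := beq_eq_false_iff_ne.mpr h9
  have e10 := beq_eq_false_iff_ne.mpr h10
  have e11 := beq_eq_false_iff_ne.mpr h11
  have e12 := beq_eq_false_iff_ne.mpr h12
  have e13 := beq_eq_false_iff_ne.mpr h13
  simp [format_option_display, pvScan, pvSeasons, pvDims, pvMetrics, pvLook, pvTable_eq,
        List.find?, e1, e2, e3, e4, e5, e6, e7, e8, e9, e10, e11, e12, e13]

-- ===== VERDICT (by name: the statement is the Claim_ definition above) =====
theorem format_option_display_spec : Claim_equal_format_option_display := by
  intro s _
  unfold Spec_format_option_display format_option_display_alt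
  rw [a_char, bisect_eq s 13 0 (pvTable.length : Int) (by rw [pvTable_len]; rfl) le_rfl le_rfl]
  intro j hj _
  omega
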